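-- pv_equiv track=rewrite | github.com/raunakdag/AI-Work | 03 Rush Hour/main.py | get_car_moves
-- ===== SOURCE A (Python) =====
-- def swap_characters(s, i1, i2):
--     string_list = list(s)
--     string_list[i1], string_list[i2] = string_list[i2], string_list[i1]
--     return "".join(string_list)
--
-- def get_car_moves(board_state, car, direction):
--     first_occurence = board_state.find(car)
--     last_occurence = board_state.rfind(car)
--
--     car_length = (last_occurence - first_occurence) + 1
--     new_board_states = []
--
--     if direction == 'L':
--         amount_to_go_left = 1
--         while((first_occurence - amount_to_go_left) % 6 != 5):
--             append_this = True
--             temp_board_state = board_state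
--             for i in range(car_length):
--                 if board_state[(first_occurence + i) - amount_to_go_left] != '0':
--                     append_this = False
--                 temp_board_state = swap_characters(
--                     temp_board_state, first_occurence + i, (first_occurence + i) - amount_to_go_left)
--             new_board_states.append(temp_board_state)
--             amount_to_go_left += 1
--     if direction == 'R':
--         amount_to_go_right = 1
--         while((last_occurence + amount_to_go_right) % 6 != 0):
--             append_this = True
--             temp_board_state = board_state
--             for i in range(car_length):
--                 if board_state[((last_occurence - i) + amount_to_go_right)] != '0':
--                     append_this = False
--                 temp_board_state = swap_characters(
--                     temp_board_state, last_occurence - i, (last_occurence - i) + amount_to_go_right)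
--             new_board_states.append(temp_board_state)
--             amount_to_go_right += 1
--     if direction == 'U':
--         pass
--     if direction == 'D':
--         pass
--
--     return new_board_states
-- ===== SOURCE B (Python) =====
-- def get_car_moves(board_state, car, direction):
--     first = board_state.find(car)
--     if first == -1:
--         return []
--     last = board_state.rfind(car)
--     block = board_state[first:last + 1]
--     moves = []
--     if direction == 'L':
--         a = 1
--         while (first - a) % 6 != 5 and board_state[first - a] == '0':
--             moves.append(board_state[:first - a] + block + '0' * a
--                          + board_state[last + 1:])
--             a += 1
--     elif direction == 'R':
--         a = 1
--         while (last + a) % 6 != 0 and board_state[last + a] == '0':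
--             moves.append(board_state[:first] + '0' * a + block
--                          + board_state[last + a + 1:])
--             a += 1
--     return moves
-- ===== Notes on version B (the rewrite author's own statement) =====
-- stated objective: simpler
-- what changed: B generates only the legal moves, stopping at the first non-'0' cell in the car's path, and builds each board in one shot as prefix + car block + '0'*amount (resp. prefix + '0'*amount + block) from find/rfind and slices, instead of A's per-character swap_characters simulation that appends every board up to the row boundary; A's append_this legality flag is computed but never used.
-- intended difference: On inputs where some appended move is illegal (the car is absent with direction 'L', or a cell the car would move through is not '0'), A still appends boards with those cells permuted by its swap loop because its append_this filter is dead code, while B omits the illegal moves, which is the intended legal-move list. — e.g. on get_car_moves("0XAA00", "A", "L"): A returns ["0AAX00", "AA0X00"], B returns []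
import Mathlib
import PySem

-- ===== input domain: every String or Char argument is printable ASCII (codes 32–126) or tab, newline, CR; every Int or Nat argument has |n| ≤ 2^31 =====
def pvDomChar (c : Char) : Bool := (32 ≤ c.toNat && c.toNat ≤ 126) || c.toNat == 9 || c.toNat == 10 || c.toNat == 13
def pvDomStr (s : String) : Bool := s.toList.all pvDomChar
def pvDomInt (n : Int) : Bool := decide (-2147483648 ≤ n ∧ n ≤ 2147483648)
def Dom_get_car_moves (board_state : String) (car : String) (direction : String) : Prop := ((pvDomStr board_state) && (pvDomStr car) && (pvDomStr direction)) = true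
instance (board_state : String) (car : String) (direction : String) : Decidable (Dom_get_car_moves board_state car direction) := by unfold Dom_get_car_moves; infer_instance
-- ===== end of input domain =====

-- B generates only the legal moves (it stops at the first non-'0' cell in the car's path) and
-- builds each board by slicing, instead of A's swap-based simulation that appends every board
-- up to the row boundary (A's append_this legality flag is dead code) — objective: simpler;
-- the illegal-move inputs are stated as an intended difference D_ below.

-- ===== PORT A =====
-- Python's swap_characters, on the code points; exact for in-range (possibly negative)
-- Python indices — out-of-range indices raise IndexError in Python and lie outside Pre_.
def pvSwapChars (s : List Char) (i1 i2 : Int) : List Char :=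
  let c1 := PySem.List.pyGetD s i1 ' '
  let c2 := PySem.List.pyGetD s i2 ' '
  let j1 : Nat := (if i1 < 0 then i1 + s.length else i1).toNat
  let j2 : Nat := (if i2 < 0 then i2 + s.length else i2).toNat
  (s.set j1 c2).set j2 c1

-- inner `for i in range(car_length)` of the 'L' branch; state = (append_this, temp_board_state)
def pvInnerL (board : List Char) (first a : Int) (carLen : Nat) : Bool × List Char :=
  (List.range carLen).foldl
    (fun (st : Bool × List Char) (i : Nat) =>
      (if PySem.List.pyGetD board (first + (i : Int) - a) ' ' ≠ '0' then false else st.1,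
       pvSwapChars st.2 (first + (i : Int)) (first + (i : Int) - a)))
    (true, board)

-- inner `for i in range(car_length)` of the 'R' branch
def pvInnerR (board : List Char) (last a : Int) (carLen : Nat) : Bool × List Char :=
  (List.range carLen).foldl
    (fun (st : Bool × List Char) (i : Nat) =>
      (if PySem.List.pyGetD board (last - (i : Int) + a) ' ' ≠ '0' then false else st.1,
       pvSwapChars st.2 (last - (i : Int)) (last - (i : Int) + a)))
    (true, board)

-- the `while` of the 'L' branch; for EVERY integer `first` the guard hits within 6 steps
-- ((first-a) % 6 runs through all residues), so 6 units of fuel reproduce Python exactly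
def pvLoopL (board : List Char) (first : Int) (carLen : Nat) : Int → Nat → List (List Char)
  | _, 0 => []
  | a, fuel+1 =>
    if PySem.Int.mod (first - a) 6 = 5 then []
    else (pvInnerL board first a carLen).2 :: pvLoopL board first carLen (a+1) fuel

-- the `while` of the 'R' branch (same exact-fuel argument)
def pvLoopR (board : List Char) (last : Int) (carLen : Nat) : Int → Nat → List (List Char)
  | _, 0 => []
  | a, fuel+1 =>
    if PySem.Int.mod (last + a) 6 = 0 then []
    else (pvInnerR board last a carLen).2 :: pvLoopR board last carLen (a+1) fuel

def get_car_moves (board_state : String) (car : String) (direction : String) : List String :=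
  let b := board_state.toList
  let first := PySem.Str.find board_state car
  let last := PySem.Str.rfind board_state car
  let carLen := (last - first + 1).toNat
  (((if direction = "L" then pvLoopL b first carLen 1 6 else []) ++
    (if direction = "R" then pvLoopR b last carLen 1 6 else [])).map fun l => String.ofList l)

-- ===== PORT B =====
-- B's 'L' loop: while the entered cell is free, new board = prefix ++ car block ++ '0'*a ++ suffix.
-- `board_state[first - a]` is ported as pyGetD (always in range when the loop guard holds).
def pvAltL (b block : List Char) (first last : Int) : Int → Nat → List (List Char)
  | _, 0 => []
  | a, fuel+1 =>
    if PySem.Int.mod (first - a) 6 = 5 then []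
    else if PySem.List.pyGetD b (first - a) ' ' = '0' then
      (PySem.List.slice b none (some (first - a)) ++ block ++
       PySem.List.pyRepeat ['0'] a ++
       PySem.List.slice b (some (last + 1)) none)
      :: pvAltL b block first last (a+1) fuel
    else []

-- B's 'R' loop: prefix ++ '0'*a ++ car block ++ suffix
def pvAltR (b block : List Char) (first last : Int) : Int → Nat → List (List Char)
  | _, 0 => []
  | a, fuel+1 =>
    if PySem.Int.mod (last + a) 6 = 0 then []
    else if PySem.List.pyGetD b (last + a) ' ' = '0' then
      (PySem.List.slice b none (some first) ++
       PySem.List.pyRepeat ['0'] a ++ block ++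
       PySem.List.slice b (some (last + a + 1)) none)
      :: pvAltR b block first last (a+1) fuel
    else []

def get_car_moves_alt (board_state : String) (car : String) (direction : String) : List String :=
  let b := board_state.toList
  let first := PySem.Str.find board_state car
  if first = -1 then []
  else
    let last := PySem.Str.rfind board_state car
    let block := PySem.List.slice b (some first) (some (last + 1))
    if direction = "L" then (pvAltL b block first last 1 6).map (fun l => String.ofList l)
    else if direction = "R" then (pvAltR b block first last 1 6).map (fun l => String.ofList l)
    else []

-- ===== PRECONDITION & SPEC =====
-- the first amount at which the 'L' loop guard (first - a) % 6 == 5 stops the loop (1..6)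
def pvGL (f : Int) : Int := if PySem.Int.mod (f + 1) 6 = 0 then 6 else PySem.Int.mod (f + 1) 6
-- the first amount at which the 'R' loop guard (last + a) % 6 == 0 stops the loop (1..6)
def pvGR (r : Int) : Int := 6 - PySem.Int.mod r 6

-- Pre_ excludes exactly the inputs on which A raises IndexError: for 'L' a board shorter
-- than 6 with the car absent (negative indices run off the left end), and for 'R' a board
-- whose row segment after the car's last occurrence would extend past the end of the string.
def Pre_get_car_moves (board_state : String) (car : String) (direction : String) : Prop :=
  (direction = "L" → (PySem.Str.find board_state car = -1 → 6 ≤ board_state.toList.length)) ∧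
  (direction = "R" →
    (PySem.Str.rfind board_state car + pvGR (PySem.Str.rfind board_state car) ≤ (board_state.toList.length : Int) ∨
     pvGR (PySem.Str.rfind board_state car) = 1))
instance (board_state : String) (car : String) (direction : String) : Decidable (Pre_get_car_moves board_state car direction) := by unfold Pre_get_car_moves; infer_instance
def pvWitness_get_car_moves : String × String × String := ("0A0000", "A", "L")

-- On inputs where some appended move is illegal (the car is absent with direction 'L', or a
-- cell the car would move through is not '0'), A still appends boards with those cells permuted
-- by its swap loop because its append_this filter is dead code, while B omits the illegal
-- moves, which is the intended legal-move list.
def D_get_car_moves (board_state : String) (car : String) (direction : String) : Prop :=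
  (direction = "L" ∧
    (PySem.Str.find board_state car = -1 ∨
     ∃ a ∈ Finset.Icc 1 5, ((a : Nat) : Int) < pvGL (PySem.Str.find board_state car) ∧
       PySem.List.pyGetD board_state.toList (PySem.Str.find board_state car - (a : Nat)) ' ' ≠ '0')) ∨
  (direction = "R" ∧ PySem.Str.find board_state car ≠ -1 ∧
     ∃ a ∈ Finset.Icc 1 5, ((a : Nat) : Int) < pvGR (PySem.Str.rfind board_state car) ∧
       PySem.List.pyGetD board_state.toList (PySem.Str.rfind board_state car + (a : Nat)) ' ' ≠ '0')
instance (board_state : String) (car : String) (direction : String) : Decidable (D_get_car_moves board_state car direction) := by unfold D_get_car_moves; infer_instance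

def Spec_get_car_moves (board_state : String) (car : String) (direction : String) (out : List String) : Prop := ¬ D_get_car_moves board_state car direction → out = get_car_moves_alt board_state car direction
instance (board_state : String) (car : String) (direction : String) (out : List String) : Decidable (Spec_get_car_moves board_state car direction out) := by unfold Spec_get_car_moves; infer_instance

def pvDiffWitness_get_car_moves : String × String × String := ("0XAA00", "A", "L")
def pvDiffWitnessOut_get_car_moves : (List String) × (List String) :=
  (["0AAX00", "AA0X00"], [])

-- ===== CLAIM (what is proved, stated in full; the proofs are below) =====
def Claim_unchanged_get_car_moves : Prop := ∀ (board_state : String) (car : String) (direction : String), Dom_get_car_moves board_state car direction → Pre_get_car_moves board_state car direction → Spec_get_car_moves board_state car direction (get_car_moves board_state car direction)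
def Claim_changed_get_car_moves : Prop := Dom_get_car_moves (pvDiffWitness_get_car_moves.1) (pvDiffWitness_get_car_moves.2.1) (pvDiffWitness_get_car_moves.2.2) ∧ Pre_get_car_moves (pvDiffWitness_get_car_moves.1) (pvDiffWitness_get_car_moves.2.1) (pvDiffWitness_get_car_moves.2.2) ∧ D_get_car_moves (pvDiffWitness_get_car_moves.1) (pvDiffWitness_get_car_moves.2.1) (pvDiffWitness_get_car_moves.2.2) ∧ get_car_moves (pvDiffWitness_get_car_moves.1) (pvDiffWitness_get_car_moves.2.1) (pvDiffWitness_get_car_moves.2.2) = pvDiffWitnessOut_get_car_moves.1 ∧ get_car_moves_alt (pvDiffWitness_get_car_moves.1) (pvDiffWitness_get_car_moves.2.1) (pvDiffWitness_get_car_moves.2.2) = pvDiffWitnessOut_get_car_moves.2 ∧ pvDiffWitnessOut_get_car_moves.1 ≠ pvDiffWitnessOut_get_car_moves.2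
def Claim_exact_get_car_moves : Prop := ∀ (board_state : String) (car : String) (direction : String), Dom_get_car_moves board_state car direction → Pre_get_car_moves board_state car direction → D_get_car_moves board_state car direction → get_car_moves board_state car direction ≠ get_car_moves_alt board_state car direction

-- ===== LEMMAS AND PROOFS =====

-- swap expressed with Nat indices (proof-side only)
def pvNatSwap (s : List Char) (i j : Nat) : List Char :=
  (s.set i (s.getD j ' ')).set j (s.getD i ' ')

theorem pvSwapChars_nonneg (s : List Char) {i1 i2 : Int} (h1 : 0 ≤ i1) (h2 : 0 ≤ i2) :
    pvSwapChars s i1 i2 = pvNatSwap s i1.toNat i2.toNat := by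
  simp [pvSwapChars, pvNatSwap, PySem.List.pyGetD_of_nonneg _ _ h1, PySem.List.pyGetD_of_nonneg _ _ h2,
    if_neg (not_lt.2 h1), if_neg (not_lt.2 h2)]

theorem pvGetD_mid (U W : List Char) (x : Char) : (U ++ x :: W).getD U.length ' ' = x := by
  induction U with
  | nil => simp
  | cons a t ih => simp

theorem pvSet_mid (U W : List Char) (x c : Char) : (U ++ x :: W).set U.length c = U ++ c :: W := by
  induction U with
  | nil => simp
  | cons a t ih => simp

theorem pvNatSwap_comm (s : List Char) {i j : Nat} (h : i ≠ j) :
    pvNatSwap s i j = pvNatSwap s j i := by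
  unfold pvNatSwap
  rw [List.set_comm _ _ h]

theorem pvNatSwap_split (U V W : List Char) (x y : Char) {i j : Nat}
    (hi : i = U.length) (hj : j = U.length + V.length + 1) :
    pvNatSwap (U ++ x :: (V ++ y :: W)) i j = U ++ y :: (V ++ x :: W) := by
  subst hi hj
  have e1 : U ++ x :: (V ++ y :: W) = (U ++ x :: V) ++ y :: W := by simp
  have el : (U ++ x :: V).length = U.length + V.length + 1 := by simp; omega
  unfold pvNatSwap
  rw [pvGetD_mid]
  rw [e1]
  rw [← el, pvGetD_mid, ← e1]
  rw [pvSet_mid]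
  have e2 : U ++ y :: (V ++ y :: W) = (U ++ y :: V) ++ y :: W := by simp
  have el2 : (U ++ x :: V).length = (U ++ y :: V).length := by simp
  rw [e2, el2, pvSet_mid]
  simp

-- rotations (proof-side only)
def pvRotL1 (l : List Char) : List Char := l.drop 1 ++ l.take 1
def pvRotL : Nat → List Char → List Char
  | 0, l => l
  | n+1, l => pvRotL1 (pvRotL n l)
def pvRotR1 (l : List Char) : List Char := l.drop (l.length - 1) ++ l.take (l.length - 1)
def pvRotR : Nat → List Char → List Char
  | 0, l => l
  | n+1, l => pvRotR1 (pvRotR n l)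

theorem pvRotL1_eq_rotate (l : List Char) : pvRotL1 l = l.rotate 1 := by
  cases l with
  | nil => simp [pvRotL1]
  | cons a t => simp [pvRotL1, List.rotate_cons_succ]

theorem pvRotL_eq_rotate (n : Nat) (l : List Char) : pvRotL n l = l.rotate n := by
  induction n with
  | zero => simp [pvRotL]
  | succ m ih => rw [pvRotL, ih, pvRotL1_eq_rotate, List.rotate_rotate]

theorem pvRotR1_rev (l : List Char) : pvRotR1 l = (l.reverse.rotate 1).reverse := by
  induction l using List.reverseRecOn with
  | nil => simp [pvRotR1]
  | append_singleton V y ih =>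
      have : pvRotR1 (V ++ [y]) = y :: V := by
        simp [pvRotR1]
      rw [this]
      simp [List.rotate_cons_succ]

theorem pvRotR_rev (n : Nat) (l : List Char) : pvRotR n l = (l.reverse.rotate n).reverse := by
  induction n with
  | zero => simp [pvRotR]
  | succ m ih =>
      rw [pvRotR, ih, pvRotR1_rev]
      simp [List.rotate_rotate]

theorem pvRotR_eq_rotate (n : Nat) (l : List Char) :
    pvRotR n l = l.rotate (l.length - n % l.length) := by
  rw [pvRotR_rev, List.rotate_reverse]
  simp

theorem pvRotL1_cons (x : Char) (t : List Char) : pvRotL1 (x :: t) = t ++ [x] := by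
  simp [pvRotL1]

theorem pvRotR1_concat (V : List Char) (y : Char) : pvRotR1 (V ++ [y]) = y :: V := by
  simp [pvRotR1]

theorem pvRotL_length (n : Nat) (l : List Char) : (pvRotL n l).length = l.length := by
  rw [pvRotL_eq_rotate]; simp

theorem pvRotR_length (n : Nat) (l : List Char) : (pvRotR n l).length = l.length := by
  rw [pvRotR_rev]; simp

theorem pvFoldl_pair_snd {α : Type} (l : List α) (g : Bool → α → Bool)
    (h : List Char → α → List Char) (x : Bool) (s : List Char) :
    (l.foldl (fun st i => (g st.1 i, h st.2 i)) (x, s)).2 = l.foldl h s := by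
  induction l generalizing x s with
  | nil => rfl
  | cons a t ih => simp [List.foldl_cons, ih]

theorem pvFoldCoreL (n : Nat) (s : List Char) (p aa : Nat) (ha : 1 ≤ aa)
    (hlen : p + aa + n ≤ s.length) :
    (List.range n).foldl (fun t i => pvNatSwap t (p + aa + i) (p + i)) s
      = s.take p ++ (s.drop (p + aa)).take n ++ pvRotL n ((s.drop p).take aa)
          ++ s.drop (p + aa + n) := by
  induction n with
  | zero =>
      simp [pvRotL]
  | succ m ih =>
      rw [List.range_succ, List.foldl_append, ih (by omega)]
      have hm : p + aa + m < s.length := by omega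
      set gap := (s.drop p).take aa with hgap
      have hgl : gap.length = aa := by
        rw [hgap]; rw [List.length_take, List.length_drop]; omega
      set M := pvRotL m gap with hM
      have hMl : M.length = aa := by rw [hM, pvRotL_length, hgl]
      have hMne : M ≠ [] := by
        intro h; rw [h] at hMl; simp at hMl; omega
      obtain ⟨m0, M', hMc⟩ := List.exists_cons_of_ne_nil hMne
      have hT : s.drop (p + aa + m) = s[p + aa + m] :: s.drop (p + aa + m + 1) :=
        List.drop_eq_getElem_cons hm
      have hU : (s.take p ++ (s.drop (p + aa)).take m).length = p + m := by
        simp [List.length_take, List.length_drop]; omega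
      have hswap :
          pvNatSwap (s.take p ++ (s.drop (p + aa)).take m ++ M ++ s.drop (p + aa + m))
              (p + aa + m) (p + m)
            = (s.take p ++ (s.drop (p + aa)).take m) ++ s[p + aa + m] ::
                (M' ++ m0 :: s.drop (p + aa + m + 1)) := by
        rw [pvNatSwap_comm _ (by omega : p + aa + m ≠ p + m)]
        have e : s.take p ++ (s.drop (p + aa)).take m ++ M ++ s.drop (p + aa + m)
            = (s.take p ++ (s.drop (p + aa)).take m) ++ m0 ::
                (M' ++ s[p + aa + m] :: s.drop (p + aa + m + 1)) := by
          rw [hMc, hT]; simp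
        rw [e]
        rw [pvNatSwap_split _ _ _ _ _ hU.symm (by
          have : M'.length = aa - 1 := by
            have := hMl; rw [hMc] at this; simp at this; omega
          rw [hU, this]; omega)]
      rw [List.foldl_cons, List.foldl_nil, Nat.add_succ (p + aa) m, hswap]
      have htk : (s.drop (p + aa)).take (m + 1)
          = (s.drop (p + aa)).take m ++ [s[p + aa + m]] := by
        rw [List.take_add_one]
        have : (s.drop (p + aa))[m]? = some s[p + aa + m] := by
          rw [List.getElem?_drop]
          rw [List.getElem?_eq_getElem (by omega)]
        rw [this]
        simp
      have hrot : pvRotL (m + 1) gap = M' ++ [m0] := by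
        rw [pvRotL, ← hM, hMc, pvRotL1_cons]
      rw [htk, hrot]
      simp

theorem pvFoldCoreR (n : Nat) (s : List Char) (q L aa : Nat) (ha : 1 ≤ aa) (hn : n ≤ L)
    (hlen : q + L + aa ≤ s.length) :
    (List.range n).foldl (fun t i => pvNatSwap t (q + L - 1 - i) (q + L - 1 - i + aa)) s
      = s.take (q + L - n) ++ pvRotR n ((s.drop (q + L)).take aa)
          ++ (s.drop (q + L - n)).take n ++ s.drop (q + L + aa) := by
  induction n with
  | zero => simp [pvRotR]
  | succ m ih =>
      rw [List.range_succ, List.foldl_append, ih (by omega), List.foldl_cons, List.foldl_nil]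
      obtain ⟨j, hj⟩ : ∃ j, q + L - m = j + 1 := ⟨q + L - m - 1, by omega⟩
      have e2 : q + L - 1 - m = j := by omega
      have e3 : q + L - (m + 1) = j := by omega
      have hjlen : j < s.length := by omega
      rw [hj, e2, e3]
      set gap := (s.drop (q + L)).take aa with hgap
      have hgl : gap.length = aa := by
        rw [hgap, List.length_take, List.length_drop]; omega
      set M := pvRotR m gap with hM
      have hMl : M.length = aa := by rw [hM, pvRotR_length, hgl]
      have hMne : M ≠ [] := by intro h; rw [h] at hMl; simp at hMl; omega
      obtain ⟨V, y, hMc⟩ : ∃ V y, M = V ++ [y] := by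
        obtain ⟨V, y, h⟩ := (List.eq_nil_or_concat M).resolve_left hMne
        exact ⟨V, y, by simpa [List.concat_eq_append] using h⟩
      have hVl : V.length = aa - 1 := by
        have := hMl; rw [hMc] at this; simp at this; omega
      have hP : s.take (j + 1) = s.take j ++ [s[j]] := by
        rw [List.take_add_one, List.getElem?_eq_getElem hjlen]; simp
      have estate : s.take (j + 1) ++ M ++ (s.drop (j + 1)).take m ++ s.drop (q + L + aa)
          = s.take j ++ s[j] ::
              (V ++ y :: ((s.drop (j + 1)).take m ++ s.drop (q + L + aa))) := by
        rw [hMc, hP]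
        simp only [List.append_assoc, List.cons_append, List.nil_append]
      rw [estate]
      rw [pvNatSwap_split _ _ _ _ _
        (by rw [List.length_take]; omega)
        (by rw [List.length_take, hVl]; omega)]
      have hrot : pvRotR (m + 1) gap = y :: V := by
        rw [pvRotR, ← hM, hMc, pvRotR1_concat]
      have hC : (s.drop j).take (m + 1) = s[j] :: (s.drop (j + 1)).take m := by
        rw [List.drop_eq_getElem_cons hjlen, List.take_succ_cons]
      rw [hrot, hC]
      simp

theorem pvRfindGo_cases (sub s : List Char) : ∀ j : Nat,
    PySem.Chars.rfind.go s sub j = -1 ∨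
      (0 ≤ PySem.Chars.rfind.go s sub j ∧ (PySem.Chars.rfind.go s sub j).toNat ≤ j ∧
        sub <+: s.drop (PySem.Chars.rfind.go s sub j).toNat) := by
  intro j
  induction j with
  | zero =>
      rw [PySem.Chars.rfind.go]
      split_ifs with h
      · right
        refine ⟨by norm_num, by norm_num, ?_⟩
        simpa using List.isPrefixOf_iff_prefix.1 h
      · left; rfl
  | succ i ih =>
      rw [PySem.Chars.rfind.go]
      split_ifs with h
      · right
        refine ⟨by positivity, by simp, ?_⟩
        simpa using List.isPrefixOf_iff_prefix.1 h
      · rcases ih with h1 | ⟨h2, h3, h4⟩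
        · exact Or.inl h1
        · exact Or.inr ⟨h2, by omega, h4⟩

theorem pvRfindGo_ne (sub s : List Char) : ∀ (j i : Nat), i ≤ j →
    sub <+: s.drop i → PySem.Chars.rfind.go s sub j ≠ -1 := by
  intro j
  induction j with
  | zero =>
      intro i hi hp
      interval_cases i
      rw [PySem.Chars.rfind.go]
      rw [if_pos (List.isPrefixOf_iff_prefix.2 (by simpa using hp))]
      norm_num
  | succ m ih =>
      intro i hi hp
      rw [PySem.Chars.rfind.go]
      split_ifs with h
      · intro hc; omega
      · rcases Nat.lt_or_ge i (m + 1) with hlt | hge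
        · exact ih i (by omega) hp
        · have he : i = m + 1 := by omega
          subst he
          exact absurd (List.isPrefixOf_iff_prefix.2 hp) (by exact_mod_cast h)

theorem pvRfind_eq_neg_one (s sub : List Char) (h : PySem.Chars.find s sub = -1) :
    PySem.Chars.rfind s sub = -1 := by
  unfold PySem.Chars.rfind
  have hni : ¬ sub <:+: s := (PySem.Chars.find_eq_neg_one_iff s sub).1 h
  rcases pvRfindGo_cases sub s s.length with h1 | ⟨_, _, h4⟩
  · exact h1
  · exact absurd (h4.isInfix.trans (List.drop_suffix _ s).isInfix) hni

theorem pvRfind_found (s sub : List Char) (h : 0 ≤ PySem.Chars.find s sub) :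
    0 ≤ PySem.Chars.rfind s sub ∧
    sub <+: s.drop (PySem.Chars.rfind s sub).toNat ∧
    PySem.Chars.find s sub ≤ PySem.Chars.rfind s sub := by
  unfold PySem.Chars.rfind
  obtain ⟨hpre, hmin⟩ := PySem.Chars.find_spec h
  have hle : (PySem.Chars.find s sub).toNat ≤ s.length := by
    have := PySem.Chars.find_le_length s sub
    omega
  have hne := pvRfindGo_ne sub s s.length (PySem.Chars.find s sub).toNat hle hpre
  rcases pvRfindGo_cases sub s s.length with h1 | ⟨h2, h3, h4⟩
  · exact absurd h1 hne
  · refine ⟨h2, h4, ?_⟩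
    by_contra hc
    rw [not_le] at hc
    exact hmin _ (by omega) h4

-- facts about find/rfind packaged for the main proof
theorem pvPresent_facts (b sub : List Char) (hne : sub ≠ []) (hf0 : 0 ≤ PySem.Chars.find b sub) :
    PySem.Chars.find b sub ≤ PySem.Chars.rfind b sub ∧
    (PySem.Chars.rfind b sub).toNat < b.length := by
  obtain ⟨hr0, hpre, hflr⟩ := pvRfind_found b sub hf0
  refine ⟨hflr, ?_⟩
  have hlen := hpre.length_le
  rw [List.length_drop] at hlen
  have hs : 1 ≤ sub.length := by
    cases sub with
    | nil => exact absurd rfl hne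
    | cons a t => simp
  omega

theorem pvRfind_nil (s : List Char) : PySem.Chars.rfind s [] = (s.length : Int) := by
  unfold PySem.Chars.rfind
  cases h : s.length with
  | zero => rw [PySem.Chars.rfind.go, if_pos (by simp)]; simp
  | succ n => rw [PySem.Chars.rfind.go, if_pos (by simp)]

-- A's shape of the 'L' body (the swap loop), as slices with the displaced gap rotated
theorem pvBodyL_eq (b : List Char) (f r a : Int) (ha : 1 ≤ a) (hpa : 0 ≤ f - a)
    (hfr : f ≤ r) (hrl : r.toNat < b.length) :
    (pvInnerL b f a ((r - f + 1).toNat)).2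
      = PySem.List.slice b none (some (f - a)) ++
        PySem.List.slice b (some f) (some (r + 1)) ++
        PySem.List.slice (PySem.List.slice b (some (f - a)) (some f)) (some (PySem.Int.mod (r - f + 1) a)) none ++
        PySem.List.slice (PySem.List.slice b (some (f - a)) (some f)) none (some (PySem.Int.mod (r - f + 1) a)) ++
        PySem.List.slice b (some (r + 1)) none := by
  have hf : 0 ≤ f := by omega
  set p := (f - a).toNat with hp
  set aa := a.toNat with haa
  set F := f.toNat with hF
  set R := r.toNat with hR
  set L := (r - f + 1).toNat with hL
  have hpi : (p : Int) = f - a := by omega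
  have haai : (aa : Int) = a := by omega
  have hFi : (F : Int) = f := by omega
  have hRi : (R : Int) = r := by omega
  have hLi : (L : Int) = r - f + 1 := by omega
  unfold pvInnerL
  have hpair := pvFoldl_pair_snd (List.range L)
    (fun bl i => if PySem.List.pyGetD b (f + (i : Int) - a) ' ' ≠ '0' then false else bl)
    (fun t i => pvSwapChars t (f + (i : Int)) (f + (i : Int) - a)) true b
  rw [show (List.foldl
        (fun (st : Bool × List Char) (i : Nat) =>
          (if PySem.List.pyGetD b (f + (i : Int) - a) ' ' ≠ '0' then false else st.1,
            pvSwapChars st.2 (f + (i : Int)) (f + (i : Int) - a)))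
        (true, b) (List.range L)).2
      = List.foldl (fun (t : List Char) (i : Nat) => pvSwapChars t (f + (i : Int)) (f + (i : Int) - a)) b (List.range L)
    from hpair]
  rw [PySem.List.foldl_congr_mem _ _ (fun t i => pvNatSwap t (p + aa + i) (p + i)) _
    (fun t i hi => by
      rw [pvSwapChars_nonneg t (by omega) (by omega)]
      congr 1 <;> omega)]
  rw [pvFoldCoreL L b p aa (by omega) (by omega)]
  rw [PySem.List.slice_to b hpa, PySem.List.slice_from b (by omega : (0:Int) ≤ r + 1)]
  rw [PySem.List.slice_toNat b hf (by omega : (0:Int) ≤ r + 1)]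
  rw [PySem.List.slice_toNat b hpa hf]
  have hkey : PySem.Int.mod (r - f + 1) a = ((L % aa : Nat) : Int) := by
    rw [← hLi, ← haai, PySem.Int.mod_natCast]
  rw [hkey]
  rw [PySem.List.slice_from _ (by positivity), PySem.List.slice_to _ (by positivity)]
  have e1 : (f - a).toNat = p := rfl
  have e3 : f.toNat = F := rfl
  have e2 : (r + 1).toNat = R + 1 := by omega
  have e4 : p + aa = F := by omega
  have e5 : R + 1 - F = L := by omega
  have e6 : F + L = R + 1 := by omega
  have e7 : F - p = aa := by omega
  have e8 : (((L % aa : Nat) : Int)).toNat = L % aa := by omega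
  simp only [e1, e3, e2, e4, e5, e6, e7, e8]
  have hgl : ((b.drop p).take aa).length = aa := by
    rw [List.length_take, List.length_drop]; omega
  have hrot : pvRotL L ((b.drop p).take aa)
      = ((b.drop p).take aa).drop (L % aa) ++ ((b.drop p).take aa).take (L % aa) := by
    rw [pvRotL_eq_rotate, ← List.rotate_mod, hgl,
      List.rotate_eq_drop_append_take (by rw [hgl]; exact le_of_lt (Nat.mod_lt _ (by omega)))]
  rw [hrot]
  simp [List.append_assoc]

-- A's shape of the 'R' body
theorem pvBodyR_eq (b : List Char) (f r a : Int) (ha : 1 ≤ a) (hf : 0 ≤ f)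
    (hfr : f ≤ r) (hra : r + 1 + a ≤ (b.length : Int)) :
    (pvInnerR b r a ((r - f + 1).toNat)).2
      = PySem.List.slice b none (some f) ++
        PySem.List.slice (PySem.List.slice b (some (r + 1)) (some (r + 1 + a))) (some (a - PySem.Int.mod (r - f + 1) a)) none ++
        PySem.List.slice (PySem.List.slice b (some (r + 1)) (some (r + 1 + a))) none (some (a - PySem.Int.mod (r - f + 1) a)) ++
        PySem.List.slice b (some f) (some (r + 1)) ++
        PySem.List.slice b (some (r + a + 1)) none := by
  set q := f.toNat with hq
  set aa := a.toNat with haa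
  set R := r.toNat with hR
  set L := (r - f + 1).toNat with hL
  have hqi : (q : Int) = f := by omega
  have haai : (aa : Int) = a := by omega
  have hRi : (R : Int) = r := by omega
  have hLi : (L : Int) = r - f + 1 := by omega
  have hlenb : R + 1 + aa ≤ b.length := by omega
  have hmod : L % aa < aa := Nat.mod_lt _ (by omega)
  unfold pvInnerR
  have hpair := pvFoldl_pair_snd (List.range L)
    (fun bl i => if PySem.List.pyGetD b (r - (i : Int) + a) ' ' ≠ '0' then false else bl)
    (fun t i => pvSwapChars t (r - (i : Int)) (r - (i : Int) + a)) true b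
  rw [show (List.foldl
        (fun (st : Bool × List Char) (i : Nat) =>
          (if PySem.List.pyGetD b (r - (i : Int) + a) ' ' ≠ '0' then false else st.1,
            pvSwapChars st.2 (r - (i : Int)) (r - (i : Int) + a)))
        (true, b) (List.range L)).2
      = List.foldl (fun (t : List Char) (i : Nat) => pvSwapChars t (r - (i : Int)) (r - (i : Int) + a)) b (List.range L)
    from hpair]
  rw [PySem.List.foldl_congr_mem _ _ (fun t i => pvNatSwap t (q + L - 1 - i) (q + L - 1 - i + aa)) _
    (fun t i hi => by
      have hiL : i < L := List.mem_range.1 hi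
      rw [pvSwapChars_nonneg t (by omega) (by omega)]
      congr 1 <;> omega)]
  rw [pvFoldCoreR L b q L aa (by omega) (le_refl L) (by omega)]
  rw [PySem.List.slice_to b hf]
  rw [PySem.List.slice_toNat b (by omega : (0:Int) ≤ r + 1) (by omega : (0:Int) ≤ r + 1 + a)]
  rw [PySem.List.slice_toNat b hf (by omega : (0:Int) ≤ r + 1)]
  rw [PySem.List.slice_from b (by omega : (0:Int) ≤ r + a + 1)]
  have hkey : PySem.Int.mod (r - f + 1) a = ((L % aa : Nat) : Int) := by
    rw [← hLi, ← haai, PySem.Int.mod_natCast]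
  rw [hkey]
  rw [PySem.List.slice_from _ (by omega : (0:Int) ≤ a - ((L % aa : Nat) : Int)),
      PySem.List.slice_to _ (by omega : (0:Int) ≤ a - ((L % aa : Nat) : Int))]
  have e1 : f.toNat = q := rfl
  have e2 : (r + 1).toNat = R + 1 := by omega
  have e3 : (r + 1 + a).toNat = R + 1 + aa := by omega
  have e4 : (r + a + 1).toNat = R + 1 + aa := by omega
  have e5 : q + L = R + 1 := by omega
  have e7 : R + 1 + aa - (R + 1) = aa := by omega
  have e8 : R + 1 - q = L := by omega
  have e10 : (a - ((L % aa : Nat) : Int)).toNat = aa - L % aa := by omega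
  have e11 : R + 1 - L = q := by omega
  simp only [e1, e2, e3, e4, e5, e7, e8, e10, e11]
  have hgl : ((b.drop (R + 1)).take aa).length = aa := by
    rw [List.length_take, List.length_drop]; omega
  have hrot : pvRotR L ((b.drop (R + 1)).take aa)
      = ((b.drop (R + 1)).take aa).drop (aa - L % aa) ++ ((b.drop (R + 1)).take aa).take (aa - L % aa) := by
    rw [pvRotR_eq_rotate, hgl, List.rotate_eq_drop_append_take (by rw [hgl]; omega)]
  rw [hrot]
  simp [List.append_assoc]

-- guard arithmetic for the stop amounts pvGL / pvGR
theorem pvModE (x : Int) : PySem.Int.mod x 6 = x % 6 :=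
  PySem.Int.mod_eq_emod_of_pos (by norm_num)

theorem pvGL_range (f : Int) : 1 ≤ pvGL f ∧ pvGL f ≤ 6 := by
  unfold pvGL
  have h1 := PySem.Int.mod_nonneg (f + 1) (by norm_num : (0:Int) < 6)
  have h2 := PySem.Int.mod_lt (f + 1) (by norm_num : (0:Int) < 6)
  split_ifs with h <;> omega

theorem pvGL_guard (f a : Int) (h1 : 1 ≤ a) (h2 : a ≤ 6) :
    PySem.Int.mod (f - a) 6 = 5 ↔ a = pvGL f := by
  unfold pvGL
  simp only [pvModE]
  split_ifs with h <;> omega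

theorem pvGL_le (f : Int) (hf : 0 ≤ f) : pvGL f ≤ f + 1 := by
  unfold pvGL
  simp only [pvModE]
  split_ifs with h <;> omega

theorem pvGR_range (r : Int) : 1 ≤ pvGR r ∧ pvGR r ≤ 6 := by
  unfold pvGR
  have h1 := PySem.Int.mod_nonneg r (by norm_num : (0:Int) < 6)
  have h2 := PySem.Int.mod_lt r (by norm_num : (0:Int) < 6)
  omega

theorem pvGR_guard (r a : Int) (h1 : 1 ≤ a) (h2 : a ≤ 6) :
    PySem.Int.mod (r + a) 6 = 0 ↔ a = pvGR r := by
  unfold pvGR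
  simp only [pvModE]
  omega

-- the displaced cells, when all free, form a block of '0's
theorem pvGapL_rep (b : List Char) (f a : Int) (ha : 1 ≤ a) (hfa : 0 ≤ f - a)
    (hfl : f.toNat ≤ b.length)
    (hz : ∀ a' : Int, 1 ≤ a' → a' ≤ a → PySem.List.pyGetD b (f - a') ' ' = '0') :
    PySem.List.slice b (some (f - a)) (some f) = List.replicate a.toNat '0' := by
  rw [PySem.List.slice_toNat b hfa (by omega)]
  apply List.ext_getElem
  · simp [List.length_take, List.length_drop]; omega
  · intro j hj1 hj2
    have hjl : j < a.toNat := by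
      simp [List.length_take, List.length_drop] at hj1; omega
    have hb : (f - a).toNat + j < b.length := by omega
    have hget : ((b.drop (f - a).toNat).take (f.toNat - (f - a).toNat))[j] = b[(f - a).toNat + j] := by
      rw [List.getElem_take, List.getElem_drop]
    rw [hget, List.getElem_replicate]
    have hz' := hz (a - j) (by omega) (by omega)
    rw [PySem.List.pyGetD_of_nonneg _ _ (by omega : (0:Int) ≤ f - (a - j))] at hz'
    rw [List.getD_eq_getElem _ _ (by omega : (f - (a - (j:Int))).toNat < b.length)] at hz'
    convert hz' using 2
    omega

theorem pvGapR_rep (b : List Char) (r a : Int) (ha : 1 ≤ a) (hr : 0 ≤ r)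
    (hra : r + 1 + a ≤ (b.length : Int))
    (hz : ∀ a' : Int, 1 ≤ a' → a' ≤ a → PySem.List.pyGetD b (r + a') ' ' = '0') :
    PySem.List.slice b (some (r + 1)) (some (r + 1 + a)) = List.replicate a.toNat '0' := by
  rw [PySem.List.slice_toNat b (by omega) (by omega)]
  apply List.ext_getElem
  · simp [List.length_take, List.length_drop]; omega
  · intro j hj1 hj2
    have hjl : j < a.toNat := by
      simp [List.length_take, List.length_drop] at hj1; omega
    have hb : (r + 1).toNat + j < b.length := by omega
    have hget : ((b.drop (r + 1).toNat).take ((r + 1 + a).toNat - (r + 1).toNat))[j] = b[(r + 1).toNat + j] := by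
      rw [List.getElem_take, List.getElem_drop]
    rw [hget, List.getElem_replicate]
    have hz' := hz (1 + j) (by omega) (by omega)
    rw [PySem.List.pyGetD_of_nonneg _ _ (by omega : (0:Int) ≤ r + (1 + j))] at hz'
    rw [List.getD_eq_getElem _ _ (by omega : (r + (1 + (j:Int))).toNat < b.length)] at hz'
    convert hz' using 2
    omega

-- A's 'L' body equals B's one-shot board when the displaced cells are all '0'
theorem pvElemL (b block : List Char) (f r a : Int) (ha : 1 ≤ a) (hpa : 0 ≤ f - a)
    (hfr : f ≤ r) (hrl : r.toNat < b.length)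
    (hblock : block = PySem.List.slice b (some f) (some (r + 1)))
    (hz : ∀ a' : Int, 1 ≤ a' → a' ≤ a → PySem.List.pyGetD b (f - a') ' ' = '0') :
    (pvInnerL b f a ((r - f + 1).toNat)).2
      = PySem.List.slice b none (some (f - a)) ++ block ++
        PySem.List.pyRepeat ['0'] a ++ PySem.List.slice b (some (r + 1)) none := by
  rw [pvBodyL_eq b f r a ha hpa hfr hrl]
  have hf : 0 ≤ f := by omega
  rw [pvGapL_rep b f a ha hpa (by omega) hz]
  rw [hblock, PySem.List.pyRepeat_singleton]
  set k := PySem.Int.mod (r - f + 1) a with hk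
  have hk0 : 0 ≤ k := PySem.Int.mod_nonneg _ (by omega)
  have hka : k < a := PySem.Int.mod_lt _ (by omega)
  rw [PySem.List.slice_from _ hk0, PySem.List.slice_to _ hk0,
      List.drop_replicate, List.take_replicate]
  rw [show min k.toNat a.toNat = k.toNat by omega]
  rw [show a.toNat = (a.toNat - k.toNat) + k.toNat by omega, List.replicate_add]
  simp [List.append_assoc]

theorem pvElemR (b block : List Char) (f r a : Int) (ha : 1 ≤ a) (hf : 0 ≤ f)
    (hfr : f ≤ r) (hra : r + 1 + a ≤ (b.length : Int))
    (hblock : block = PySem.List.slice b (some f) (some (r + 1)))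
    (hz : ∀ a' : Int, 1 ≤ a' → a' ≤ a → PySem.List.pyGetD b (r + a') ' ' = '0') :
    (pvInnerR b r a ((r - f + 1).toNat)).2
      = PySem.List.slice b none (some f) ++
        PySem.List.pyRepeat ['0'] a ++ block ++
        PySem.List.slice b (some (r + a + 1)) none := by
  rw [pvBodyR_eq b f r a ha hf hfr hra]
  rw [pvGapR_rep b r a ha (by omega) hra hz]
  rw [hblock, PySem.List.pyRepeat_singleton]
  set k := PySem.Int.mod (r - f + 1) a with hk
  have hk0 : 0 ≤ k := PySem.Int.mod_nonneg _ (by omega)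
  have hka : k < a := PySem.Int.mod_lt _ (by omega)
  rw [PySem.List.slice_from _ (by omega : (0:Int) ≤ a - k),
      PySem.List.slice_to _ (by omega : (0:Int) ≤ a - k),
      List.drop_replicate, List.take_replicate]
  rw [show min (a - k).toNat a.toNat = (a - k).toNat by omega]
  rw [show a.toNat = (a.toNat - (a - k).toNat) + (a - k).toNat by omega, List.replicate_add]
  simp [List.append_assoc]

-- the 'L' while-loops of A and B coincide when no displaced cell blocks the move
theorem pvLoopL_eq_altB (b block : List Char) (f r : Int) (hf : 0 ≤ f) (hfr : f ≤ r)
    (hrl : r.toNat < b.length)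
    (hblock : block = PySem.List.slice b (some f) (some (r + 1)))
    (hzero : ∀ a : Int, 1 ≤ a → a < pvGL f → PySem.List.pyGetD b (f - a) ' ' = '0') :
    ∀ (fuel : Nat) (a : Int), 1 ≤ a → a ≤ pvGL f →
      pvLoopL b f ((r - f + 1).toNat) a fuel = pvAltL b block f r a fuel := by
  intro fuel
  induction fuel with
  | zero => intro a _ _; rfl
  | succ n ih =>
      intro a h1 h2
      by_cases hg : PySem.Int.mod (f - a) 6 = 5
      · simp only [pvLoopL, pvAltL, if_pos hg]
      · have h6 : a ≤ 6 := le_trans h2 (pvGL_range f).2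
        have hlt : a < pvGL f := by
          rcases lt_or_eq_of_le h2 with h | h
          · exact h
          · exact absurd ((pvGL_guard f a h1 h6).2 h) hg
        have hcell := hzero a h1 hlt
        have hpa : 0 ≤ f - a := by have := pvGL_le f hf; omega
        simp only [pvLoopL, pvAltL, if_neg hg, if_pos hcell]
        congr 1
        · exact pvElemL b block f r a h1 hpa hfr hrl hblock
            (fun a' u v => hzero a' u (by omega))
        · exact ih (a + 1) (by omega) (by omega)

-- the 'R' while-loops of A and B coincide when no displaced cell blocks the move
theorem pvLoopR_eq_altB (b block : List Char) (f r : Int) (hf : 0 ≤ f) (hfr : f ≤ r)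
    (hblock : block = PySem.List.slice b (some f) (some (r + 1)))
    (hlen : r + pvGR r ≤ (b.length : Int) ∨ pvGR r = 1)
    (hzero : ∀ a : Int, 1 ≤ a → a < pvGR r → PySem.List.pyGetD b (r + a) ' ' = '0') :
    ∀ (fuel : Nat) (a : Int), 1 ≤ a → a ≤ pvGR r →
      pvLoopR b r ((r - f + 1).toNat) a fuel = pvAltR b block f r a fuel := by
  intro fuel
  induction fuel with
  | zero => intro a _ _; rfl
  | succ n ih =>
      intro a h1 h2
      by_cases hg : PySem.Int.mod (r + a) 6 = 0
      · simp only [pvLoopR, pvAltR, if_pos hg]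
      · have h6 : a ≤ 6 := le_trans h2 (pvGR_range r).2
        have hlt : a < pvGR r := by
          rcases lt_or_eq_of_le h2 with h | h
          · exact h
          · exact absurd ((pvGR_guard r a h1 h6).2 h) hg
        have hcell := hzero a h1 hlt
        have hra : r + 1 + a ≤ (b.length : Int) := by
          rcases hlen with h | h
          · omega
          · omega
        simp only [pvLoopR, pvAltR, if_neg hg, if_pos hcell]
        congr 1
        · exact pvElemR b block f r a h1 hf hfr hra hblock
            (fun a' u v => hzero a' u (by omega))
        · exact ih (a + 1) (by omega) (by omega)

-- lengths, for the tightness theorem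
theorem pvLoopL_len (b : List Char) (f : Int) (L : Nat) :
    ∀ (fuel : Nat) (a : Int), 1 ≤ a → a ≤ pvGL f → pvGL f ≤ a + (fuel : Int) →
      (pvLoopL b f L a fuel).length = (pvGL f - a).toNat := by
  intro fuel
  induction fuel with
  | zero =>
      intro a h1 h2 h3
      have : a = pvGL f := by push_cast at h3; omega
      simp [pvLoopL]; omega
  | succ n ih =>
      intro a h1 h2 h3
      by_cases hg : PySem.Int.mod (f - a) 6 = 5
      · have ha : a = pvGL f := (pvGL_guard f a h1 (le_trans h2 (pvGL_range f).2)).1 hg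
        simp only [pvLoopL, if_pos hg, List.length_nil]
        omega
      · have hlt : a < pvGL f := by
          rcases lt_or_eq_of_le h2 with h | h
          · exact h
          · exact absurd ((pvGL_guard f a h1 (le_trans h2 (pvGL_range f).2)).2 h) hg
        simp only [pvLoopL, if_neg hg, List.length_cons]
        rw [ih (a + 1) (by omega) (by omega) (by push_cast at h3 ⊢; omega)]
        omega

theorem pvLoopR_len (b : List Char) (r : Int) (L : Nat) :
    ∀ (fuel : Nat) (a : Int), 1 ≤ a → a ≤ pvGR r → pvGR r ≤ a + (fuel : Int) →
      (pvLoopR b r L a fuel).length = (pvGR r - a).toNat := by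
  intro fuel
  induction fuel with
  | zero =>
      intro a h1 h2 h3
      have : a = pvGR r := by push_cast at h3; omega
      simp [pvLoopR]; omega
  | succ n ih =>
      intro a h1 h2 h3
      by_cases hg : PySem.Int.mod (r + a) 6 = 0
      · have ha : a = pvGR r := (pvGR_guard r a h1 (le_trans h2 (pvGR_range r).2)).1 hg
        simp only [pvLoopR, if_pos hg, List.length_nil]
        omega
      · have hlt : a < pvGR r := by
          rcases lt_or_eq_of_le h2 with h | h
          · exact h
          · exact absurd ((pvGR_guard r a h1 (le_trans h2 (pvGR_range r).2)).2 h) hg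
        simp only [pvLoopR, if_neg hg, List.length_cons]
        rw [ih (a + 1) (by omega) (by omega) (by push_cast at h3 ⊢; omega)]
        omega

theorem pvAltL_len_le (b block : List Char) (f r a0 : Int)
    (hc : PySem.List.pyGetD b (f - a0) ' ' ≠ '0') :
    ∀ (fuel : Nat) (a : Int), 1 ≤ a → a ≤ a0 →
      (pvAltL b block f r a fuel).length ≤ (a0 - a).toNat := by
  intro fuel
  induction fuel with
  | zero => intro a _ _; simp [pvAltL]
  | succ n ih =>
      intro a h1 h2
      simp only [pvAltL]
      split_ifs with hg hcell
      · simp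
      · have hne : a ≠ a0 := fun h => hc (h ▸ hcell)
        simp only [List.length_cons]
        have := ih (a + 1) (by omega) (by omega)
        omega
      · simp

theorem pvAltR_len_le (b block : List Char) (f r a0 : Int)
    (hc : PySem.List.pyGetD b (r + a0) ' ' ≠ '0') :
    ∀ (fuel : Nat) (a : Int), 1 ≤ a → a ≤ a0 →
      (pvAltR b block f r a fuel).length ≤ (a0 - a).toNat := by
  intro fuel
  induction fuel with
  | zero => intro a _ _; simp [pvAltR]
  | succ n ih =>
      intro a h1 h2
      simp only [pvAltR]
      split_ifs with hg hcell
      · simp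
      · have hne : a ≠ a0 := fun h => hc (h ▸ hcell)
        simp only [List.length_cons]
        have := ih (a + 1) (by omega) (by omega)
        omega
      · simp

-- ===== VERDICT (by name: the statement is the Claim_ definition above) =====
theorem get_car_moves_spec : Claim_unchanged_get_car_moves := by
  intro bs car dir hdom hpre
  unfold Spec_get_car_moves
  intro hnd
  obtain ⟨hpreL, hpreR⟩ := hpre
  by_cases hL : dir = "L"
  · subst hL
    have hfne : PySem.Str.find bs car ≠ -1 := fun h => hnd (Or.inl ⟨rfl, Or.inl h⟩)
    have hf : 0 ≤ PySem.Str.find bs car := by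
      have := PySem.Chars.neg_one_le_find bs.toList car.toList
      rw [PySem.Str.find_eq] at hfne ⊢
      omega
    have hzero : ∀ a : Int, 1 ≤ a → a < pvGL (PySem.Str.find bs car) →
        PySem.List.pyGetD bs.toList (PySem.Str.find bs car - a) ' ' = '0' := by
      intro a h1 h2
      by_contra hc
      apply hnd
      left
      refine ⟨rfl, Or.inr ⟨a.toNat, Finset.mem_Icc.2 ⟨by omega, by
        have := (pvGL_range (PySem.Str.find bs car)).2; omega⟩, ?_, ?_⟩⟩
      · rw [show ((a.toNat : Nat) : Int) = a by omega]; exact h2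
      · rw [show ((a.toNat : Nat) : Int) = a by omega]; exact hc
    simp only [get_car_moves, get_car_moves_alt, if_neg hfne,
      if_neg (by decide : ¬("L" = "R")), List.append_nil]
    by_cases hcar : car.toList = []
    · have hf0 : PySem.Str.find bs car = 0 := by
        rw [PySem.Str.find_eq, hcar, PySem.Chars.find_nil]
      rw [hf0]
      rw [show pvLoopL bs.toList 0 ((PySem.Str.rfind bs car - 0 + 1).toNat) 1 6
            = [] from by rw [pvLoopL]; rw [if_pos (by decide)]]
      rw [show pvAltL bs.toList
            (PySem.List.slice bs.toList (some 0) (some (PySem.Str.rfind bs car + 1)))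
            0 (PySem.Str.rfind bs car) 1 6
            = [] from by rw [pvAltL]; rw [if_pos (by decide)]]
      simp
    · rw [PySem.Str.find_eq, PySem.Str.rfind_eq] at *
      obtain ⟨hflr, hrl⟩ := pvPresent_facts bs.toList car.toList hcar hf
      rw [pvLoopL_eq_altB bs.toList _ _ _ hf hflr hrl rfl hzero 6 1 (by norm_num)
        (pvGL_range _).1]
      simp
  · by_cases hR : dir = "R"
    · subst hR
      by_cases hfe : PySem.Str.find bs car = -1
      · have hre : PySem.Str.rfind bs car = -1 := by
          rw [PySem.Str.rfind_eq]
          exact pvRfind_eq_neg_one bs.toList car.toList (by rw [← PySem.Str.find_eq]; exact hfe)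
        simp only [get_car_moves, get_car_moves_alt, if_pos hfe,
          if_neg (by decide : ¬("R" = "L")), List.nil_append, hre]
        rw [show pvLoopR bs.toList (-1) ((-1 - PySem.Str.find bs car + 1).toNat) 1 6
              = [] from by rw [pvLoopR]; rw [if_pos (by decide)]]
        simp
      · have hf : 0 ≤ PySem.Str.find bs car := by
          have := PySem.Chars.neg_one_le_find bs.toList car.toList
          rw [PySem.Str.find_eq] at hfe ⊢
          omega
        have hzero : ∀ a : Int, 1 ≤ a → a < pvGR (PySem.Str.rfind bs car) →
            PySem.List.pyGetD bs.toList (PySem.Str.rfind bs car + a) ' ' = '0' := by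
          intro a h1 h2
          by_contra hc
          apply hnd
          right
          refine ⟨rfl, hfe, a.toNat, Finset.mem_Icc.2 ⟨by omega, by
            have := (pvGR_range (PySem.Str.rfind bs car)).2; omega⟩, ?_, ?_⟩
          · rw [show ((a.toNat : Nat) : Int) = a by omega]; exact h2
          · rw [show ((a.toNat : Nat) : Int) = a by omega]; exact hc
        have hM := hpreR rfl
        simp only [get_car_moves, get_car_moves_alt, if_neg hfe,
          if_neg (by decide : ¬("R" = "L")), List.nil_append]
        have hflr : PySem.Str.find bs car ≤ PySem.Str.rfind bs car := by
          by_cases hcar : car.toList = []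
          · rw [PySem.Str.find_eq, PySem.Str.rfind_eq, hcar, PySem.Chars.find_nil, pvRfind_nil]
            positivity
          · rw [PySem.Str.find_eq, PySem.Str.rfind_eq]
            exact (pvRfind_found bs.toList car.toList (by rw [← PySem.Str.find_eq]; exact hf)).2.2
        rw [pvLoopR_eq_altB bs.toList _ _ _ hf hflr rfl hM hzero 6 1 (by norm_num)
          (pvGR_range _).1]
        simp
    · simp only [get_car_moves, get_car_moves_alt, if_neg hL, if_neg hR, List.append_nil,
        List.map_nil]
      split_ifs <;> rfl

theorem get_car_moves_changed : Claim_changed_get_car_moves := by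
  unfold Claim_changed_get_car_moves; decide

theorem get_car_moves_tight : Claim_exact_get_car_moves := by
  intro bs car dir hdom hpre hD heq
  have hlen := congrArg List.length heq
  rcases hD with ⟨hdir, hcase⟩ | ⟨hdir, hfne, a0, hmem, hlt, hcell⟩
  · subst hdir
    rcases hcase with hfneg | ⟨a0, hmem, hlt, hcell⟩
    · rw [show get_car_moves bs car "L"
            = (pvLoopL bs.toList (PySem.Str.find bs car)
                ((PySem.Str.rfind bs car - PySem.Str.find bs car + 1).toNat) 1 6).map
                (fun l => String.ofList l) from by
          simp [get_car_moves]] at hlen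
      rw [show get_car_moves_alt bs car "L" = [] from by
        simp only [get_car_moves_alt]; rw [if_pos hfneg]] at hlen
      rw [List.length_map] at hlen
      rw [pvLoopL_len bs.toList (PySem.Str.find bs car) _ 6 1 (by norm_num)
        (by rw [hfneg]; decide) (by rw [hfneg]; decide)] at hlen
      rw [hfneg] at hlen
      have h6 : pvGL (-1) = 6 := by decide
      simp [List.length_nil] at hlen
      omega
    · have hfge : 0 ≤ PySem.Str.find bs car ∨ PySem.Str.find bs car = -1 := by
        have := PySem.Chars.neg_one_le_find bs.toList car.toList
        rw [PySem.Str.find_eq]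
        omega
      rcases hfge with hf | hfneg
      · have hfne : PySem.Str.find bs car ≠ -1 := by omega
        obtain ⟨h1, h5⟩ := Finset.mem_Icc.1 hmem
        rw [show get_car_moves bs car "L"
              = (pvLoopL bs.toList (PySem.Str.find bs car)
                  ((PySem.Str.rfind bs car - PySem.Str.find bs car + 1).toNat) 1 6).map
                  (fun l => String.ofList l) from by
            simp [get_car_moves]] at hlen
        rw [show get_car_moves_alt bs car "L"
              = (pvAltL bs.toList
                  (PySem.List.slice bs.toList (some (PySem.Str.find bs car))
                    (some (PySem.Str.rfind bs car + 1)))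
                  (PySem.Str.find bs car) (PySem.Str.rfind bs car) 1 6).map
                  (fun l => String.ofList l) from by
            simp only [get_car_moves_alt]; rw [if_neg hfne]; rfl] at hlen
        rw [List.length_map, List.length_map] at hlen
        rw [pvLoopL_len bs.toList (PySem.Str.find bs car) _ 6 1 (by norm_num)
          (pvGL_range _).1 (by have := (pvGL_range (PySem.Str.find bs car)).2; push_cast; omega)] at hlen
        have hB := pvAltL_len_le bs.toList
          (PySem.List.slice bs.toList (some (PySem.Str.find bs car))
            (some (PySem.Str.rfind bs car + 1)))
          (PySem.Str.find bs car) (PySem.Str.rfind bs car) ((a0 : Nat) : Int) hcell 6 1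
          (by norm_num) (by exact_mod_cast h1)
        omega
      · rw [show get_car_moves bs car "L"
              = (pvLoopL bs.toList (PySem.Str.find bs car)
                  ((PySem.Str.rfind bs car - PySem.Str.find bs car + 1).toNat) 1 6).map
                  (fun l => String.ofList l) from by
            simp [get_car_moves]] at hlen
        rw [show get_car_moves_alt bs car "L" = [] from by
          simp only [get_car_moves_alt]; rw [if_pos hfneg]] at hlen
        rw [List.length_map] at hlen
        rw [pvLoopL_len bs.toList (PySem.Str.find bs car) _ 6 1 (by norm_num)
          (by rw [hfneg]; decide) (by rw [hfneg]; decide)] at hlen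
        rw [hfneg] at hlen
        have h6 : pvGL (-1) = 6 := by decide
        simp [List.length_nil] at hlen
        omega
  · subst hdir
    obtain ⟨h1, h5⟩ := Finset.mem_Icc.1 hmem
    rw [show get_car_moves bs car "R"
          = (pvLoopR bs.toList (PySem.Str.rfind bs car)
              ((PySem.Str.rfind bs car - PySem.Str.find bs car + 1).toNat) 1 6).map
              (fun l => String.ofList l) from by
        simp [get_car_moves]] at hlen
    rw [show get_car_moves_alt bs car "R"
          = (pvAltR bs.toList
              (PySem.List.slice bs.toList (some (PySem.Str.find bs car))
                (some (PySem.Str.rfind bs car + 1)))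
              (PySem.Str.find bs car) (PySem.Str.rfind bs car) 1 6).map
              (fun l => String.ofList l) from by
        simp only [get_car_moves_alt]; rw [if_neg hfne]; rfl] at hlen
    rw [List.length_map, List.length_map] at hlen
    rw [pvLoopR_len bs.toList (PySem.Str.rfind bs car) _ 6 1 (by norm_num)
      (pvGR_range _).1 (by have := (pvGR_range (PySem.Str.rfind bs car)).2; push_cast; omega)] at hlen
    have hB := pvAltR_len_le bs.toList
      (PySem.List.slice bs.toList (some (PySem.Str.find bs car))
        (some (PySem.Str.rfind bs car + 1)))
      (PySem.Str.find bs car) (PySem.Str.rfind bs car) ((a0 : Nat) : Int) hcell 6 1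
      (by norm_num) (by exact_mod_cast h1)
    omega
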